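-- pv_equiv track=rewrite | github.com/MatheusRodriguesBezerra/IA | trabalho3/main.py | get_value_counts
-- ===== SOURCE A (Python) =====
-- def get_value_counts(data):
--     keys = list(data[0].keys())[1:-1]
--     last_key = list(data[0].keys())[-1]
--     value_counts = {}
--     for key in keys:
--         value_counts[key] = {}
--         for item in data:
--             value = item[key]
--             class_value = item[last_key]
--             if value not in value_counts[key]:
--                 value_counts[key][value] = {}
--             if class_value not in value_counts[key][value]:
--                 value_counts[key][value][class_value] = 0
--             value_counts[key][value][class_value] += 1
--
--     for key in value_counts:
--         for value in value_counts[key]: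
--             value_counts[key][value]["total_count"] = sum(value_counts[key][value].values())
--     return value_counts
-- ===== SOURCE B (Python) =====
-- def get_value_counts(data):
--     all_keys = list(data[0].keys())
--     keys = all_keys[1:-1]
--     last_key = all_keys[-1]
--     result = {}
--     for key in keys:
--         pairs = [(item[key], item[last_key]) for item in data]
--         result[key] = {
--             v: dict(
--                 [(c, pairs.count((v, c)))
--                  for c in dict.fromkeys(c2 for v2, c2 in pairs if v2 == v)]
--                 + [("total_count", sum(1 for v2, _ in pairs if v2 == v))]
--             )
--             for v in dict.fromkeys(v2 for v2, _ in pairs)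
--         }
--     return result
-- ===== Notes on version B (the rewrite author's own statement) =====
-- stated objective: alternative
-- what changed: A builds the nested tables imperatively, incrementing nested dict counters item by item and then running a second double-loop that adds totals via sum(); B builds each key's table declaratively in one expression: it enumerates the distinct values and distinct classes in first-occurrence order with dict.fromkeys and obtains every class count and the total directly by counting/filtering the (value, class) pair list, with no mutation and no separate totaling pass.
import Mathlib
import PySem

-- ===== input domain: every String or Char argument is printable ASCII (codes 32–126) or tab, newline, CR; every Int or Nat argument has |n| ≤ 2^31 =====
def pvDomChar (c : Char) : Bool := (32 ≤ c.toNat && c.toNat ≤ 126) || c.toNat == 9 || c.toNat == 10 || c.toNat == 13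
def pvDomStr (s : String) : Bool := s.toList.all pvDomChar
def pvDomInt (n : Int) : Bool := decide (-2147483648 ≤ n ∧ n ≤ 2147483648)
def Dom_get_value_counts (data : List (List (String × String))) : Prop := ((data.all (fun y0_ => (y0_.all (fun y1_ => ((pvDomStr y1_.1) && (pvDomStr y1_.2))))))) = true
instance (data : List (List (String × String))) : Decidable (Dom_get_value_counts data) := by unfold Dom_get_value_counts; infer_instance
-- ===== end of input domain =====

-- B replaces A's incremental nested-counter mutation (build nested dicts item by item, then a
-- second double-loop adding totals via sum()) by a declarative construction: enumerate the
-- distinct values and classes in first-occurrence order with dict.fromkeys and obtain every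
-- count directly by counting matching pairs (objective: alternative).

-- ===== PORT A =====
-- rows are Python dicts, ported as PySem.Dict.ofList of the association list.
-- body of A's inner 'for item in data' loop (named so the fold stays readable);
-- item[key] / item[last_key] raise KeyError when the key is absent: Pre_ excludes those
-- inputs, the port reads getD with an irrelevant default there.
def pvA_inner (last_key key : String)
    (value_counts : PySem.Dict String (PySem.Dict String (PySem.Dict String Int)))
    (item : List (String × String)) : PySem.Dict String (PySem.Dict String (PySem.Dict String Int)) :=
  let value := (PySem.Dict.ofList item).getD key ""
  let class_value := (PySem.Dict.ofList item).getD last_key ""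
  let d := value_counts.getD key PySem.Dict.empty
  let d := if d.contains value then d else d.insert value PySem.Dict.empty
  let cc := d.getD value PySem.Dict.empty
  let cc := if cc.contains class_value then cc else cc.insert class_value (0 : Int)
  value_counts.insert key (d.insert value (cc.insert class_value (cc.getD class_value 0 + 1)))

-- data[0] on empty data and keys()[-1] on an empty first row raise IndexError: the [] /
-- none branches are excluded by Pre_.
def get_value_counts (data : List (List (String × String))) : List (String × List (String × List (String × Int))) :=
  match data with
  | [] => []
  | row0 :: _ =>
    let ks := (PySem.Dict.ofList row0).keys
    let keys := PySem.List.slice ks (some 1) (some (-1))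
    match PySem.List.pyGet? ks (-1) with
    | none => []
    | some last_key =>
      let value_counts :=
        keys.foldl (fun value_counts key =>
          data.foldl (pvA_inner last_key key) (value_counts.insert key PySem.Dict.empty))
          (PySem.Dict.empty : PySem.Dict String (PySem.Dict String (PySem.Dict String Int)))
      -- second pass: value_counts[key][value]["total_count"] = sum(values()); the nested
      -- dicts are then rendered as association lists (the stated type convention)
      value_counts.items.map (fun p => (p.1, p.2.items.map (fun q =>
        (q.1, (q.2.insert "total_count" q.2.values.sum).items))))

-- ===== PORT B =====
-- pairs = [(item[key], item[last_key]) for item in data]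
def pvB_pairs (data : List (List (String × String))) (key last_key : String) : List (String × String) :=
  data.map (fun item => ((PySem.Dict.ofList item).getD key "", (PySem.Dict.ofList item).getD last_key ""))

-- [(c, pairs.count((v, c))) for c in dict.fromkeys(c2 for v2, c2 in pairs if v2 == v)]
def pvB_classCounts (pairs : List (String × String)) (v : String) : List (String × Int) :=
  (PySem.List.dedup ((pairs.filter (fun p => p.1 == v)).map Prod.snd)).map
    (fun c => (c, (pairs.count (v, c) : Int)))

-- {v: dict(classCounts + [("total_count", sum(1 for v2,_ in pairs if v2 == v))]) for v in dict.fromkeys(...)}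
def pvB_valueTable (pairs : List (String × String)) : List (String × List (String × Int)) :=
  (PySem.List.dedup (pairs.map Prod.fst)).map (fun v =>
    (v, (PySem.Dict.ofList (pvB_classCounts pairs v
          ++ [("total_count", (pairs.countP (fun p => p.1 == v) : Int))])).items))

def get_value_counts_alt (data : List (List (String × String))) : List (String × List (String × List (String × Int))) :=
  match data with
  | [] => []
  | row0 :: _ =>
    let all_keys := (PySem.Dict.ofList row0).keys
    let keys := PySem.List.slice all_keys (some 1) (some (-1))
    match PySem.List.pyGet? all_keys (-1) with
    | none => []
    | some last_key =>
      (keys.foldl (fun res key => res.insert key (pvB_valueTable (pvB_pairs data key last_key)))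
        (PySem.Dict.empty : PySem.Dict String (List (String × List (String × Int))))).items

-- ===== PRECONDITION & SPEC =====
-- Pre_ excludes exactly the inputs where the Python A raises: empty data or an empty first
-- row (IndexError on list(data[0].keys())[-1]) and, when keys[1:-1] is nonempty (only then
-- does A touch the rows), rows missing one of the accessed keys (keys[1:-1] of the first
-- row, or its last key: KeyError on item[key] / item[last_key]).
def Pre_get_value_counts (data : List (List (String × String))) : Prop :=
  data ≠ [] ∧
  (let ks := (PySem.Dict.ofList (data.headD [])).keys
   ks ≠ [] ∧
   (PySem.List.slice ks (some 1) (some (-1)) = [] ∨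
    ∀ item ∈ data,
      (PySem.Dict.ofList item).contains (ks.getLastD "") = true ∧
      ∀ k ∈ PySem.List.slice ks (some 1) (some (-1)), (PySem.Dict.ofList item).contains k = true))
instance (data : List (List (String × String))) : Decidable (Pre_get_value_counts data) := by
  unfold Pre_get_value_counts; infer_instance
def pvWitness_get_value_counts : (List (List (String × String))) :=
  [[("id", "1"), ("f", "a"), ("cls", "y")], [("id", "2"), ("f", "a"), ("cls", "n")]]

def Spec_get_value_counts (data : List (List (String × String))) (out : List (String × List (String × List (String × Int)))) : Prop := out = get_value_counts_alt data
instance (data : List (List (String × String))) (out : List (String × List (String × List (String × Int)))) : Decidable (Spec_get_value_counts data out) := by unfold Spec_get_value_counts; infer_instance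

-- ===== CLAIM (what is proved, stated in full; the proofs are below) =====
def Claim_equal_get_value_counts : Prop := ∀ (data : List (List (String × String))), Dom_get_value_counts data → Pre_get_value_counts data → Spec_get_value_counts data (get_value_counts data)

-- ===== LEMMAS AND PROOFS =====

-- ---- A-side: A's nested fold in canonical per-key form ----

-- the per-item update of one key's nested table
def pvUpd (last_key key : String) (item : List (String × String))
    (d : PySem.Dict String (PySem.Dict String Int)) : PySem.Dict String (PySem.Dict String Int) :=
  let value := (PySem.Dict.ofList item).getD key ""
  let class_value := (PySem.Dict.ofList item).getD last_key ""
  let counts := d.getD value PySem.Dict.empty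
  d.insert value (counts.insert class_value (counts.getD class_value 0 + 1))

-- A's membership-test-then-increment body, acting on one key's table
def pvStepA (last_key key : String) (item : List (String × String))
    (d : PySem.Dict String (PySem.Dict String Int)) : PySem.Dict String (PySem.Dict String Int) :=
  let value := (PySem.Dict.ofList item).getD key ""
  let class_value := (PySem.Dict.ofList item).getD last_key ""
  let d := if d.contains value then d else d.insert value PySem.Dict.empty
  let cc := d.getD value PySem.Dict.empty
  let cc := if cc.contains class_value then cc else cc.insert class_value (0 : Int)
  d.insert value (cc.insert class_value (cc.getD class_value 0 + 1))

-- A's body computes exactly the simple update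
lemma pvStepA_eq_pvUpd (last_key key : String) (item : List (String × String))
    (d : PySem.Dict String (PySem.Dict String Int)) :
    pvStepA last_key key item d = pvUpd last_key key item d := by
  unfold pvStepA pvUpd
  set value := (PySem.Dict.ofList item).getD key "" with hval
  set class_value := (PySem.Dict.ofList item).getD last_key "" with hcl
  simp only []
  by_cases hv : d.contains value = true
  · rw [if_pos hv]
    by_cases hc : (d.getD value PySem.Dict.empty).contains class_value = true
    · rw [if_pos hc]
    · rw [if_neg hc, PySem.Dict.getD_insert_self, PySem.Dict.insert_insert_self,
        PySem.Dict.getD_of_not_contains _ _ (eq_false_of_ne_true hc)]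
  · rw [if_neg hv, PySem.Dict.getD_insert_self, PySem.Dict.contains_empty]
    rw [if_neg (by simp), PySem.Dict.getD_insert_self, PySem.Dict.insert_insert_self,
      PySem.Dict.getD_of_not_contains _ _ (eq_false_of_ne_true hv), PySem.Dict.getD_empty,
      PySem.Dict.insert_insert_self]

-- A's inner loop repeatedly overwrites the single key `key`: it is the overwrite of the
-- looped-up table
lemma pvA_thread (last_key key : String) (l : List (List (String × String))) :
    ∀ (vc : PySem.Dict String (PySem.Dict String (PySem.Dict String Int)))
      (e : PySem.Dict String (PySem.Dict String Int)),
      l.foldl (pvA_inner last_key key) (vc.insert key e) =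
        vc.insert key (l.foldl (fun d item => pvUpd last_key key item d) e) := by
  induction l with
  | nil => intro vc e; rfl
  | cons b t ih =>
    intro vc e
    simp only [List.foldl_cons]
    have h2 : pvA_inner last_key key (vc.insert key e) b
        = (vc.insert key e).insert key (pvStepA last_key key b ((vc.insert key e).getD key PySem.Dict.empty)) := rfl
    rw [h2, PySem.Dict.getD_insert_self, PySem.Dict.insert_insert_self, pvStepA_eq_pvUpd, ih]

lemma pvMapFst {ν : Type} (g : String → ν) (l : List String) :
    List.map Prod.fst (l.map (fun k => (k, g k))) = l := by
  induction l <;> simp_all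

-- a fold inserting distinct fresh keys, rendered in canonical map form
lemma pvBuild_canonical {ν : Type} (ks : List String) (hnd : ks.Nodup) (f : String → ν) :
    ks.foldl (fun vc key => vc.insert key (f key)) PySem.Dict.empty
      = PySem.Dict.mk (ks.map (fun k => (k, f k))) := by
  apply PySem.Dict.ext
  rw [PySem.Dict.items_foldl_insert_fresh ks (fun a => a) f PySem.Dict.empty
    (fun a _ => PySem.Dict.contains_empty a) (by simpa using hnd)]
  simp [PySem.Dict.empty]

lemma pvSlice_sublist {α : Type} (xs : List α) (a b : Option Int) :
    (PySem.List.slice xs a b).Sublist xs := by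
  simp only [PySem.List.slice]
  exact (List.take_sublist _ _).trans (List.drop_sublist _ _)

-- ---- the pair-level step and the canonical (declarative) table ----

def pvStep (d : PySem.Dict String (PySem.Dict String Int)) (p : String × String) :
    PySem.Dict String (PySem.Dict String Int) :=
  let dv := d.getD p.1 PySem.Dict.empty
  d.insert p.1 (dv.insert p.2 (dv.getD p.2 0 + 1))

def pvTbl (ps : List (String × String)) : PySem.Dict String (PySem.Dict String Int) :=
  PySem.Dict.mk ((PySem.List.dedup (ps.map Prod.fst)).map
    (fun v => (v, PySem.Dict.mk (pvB_classCounts ps v))))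

-- counting class c among the items with value v is counting the pair (v, c)
lemma pvCount_filter (ps : List (String × String)) (v c : String) :
    ((ps.filter (fun p => p.1 == v)).map Prod.snd).count c = ps.count (v, c) := by
  induction ps with
  | nil => rfl
  | cons p t ih =>
    by_cases h1 : p.1 = v
    · by_cases h2 : p.2 = c
      · have : p = (v, c) := Prod.ext h1 h2
        simp [this, List.count_cons, ih]
      · simp [List.filter_cons, h1, List.count_cons, h2, ih,
          show p ≠ (v, c) from fun h => h2 (by rw [h])]
    · simp [List.filter_cons, h1, List.count_cons, ih,
        show p ≠ (v, c) from fun h => h1 (by rw [h])]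

lemma pvDedup_append {α : Type} [BEq α] [LawfulBEq α] (l : List α) (x : α) :
    PySem.List.dedup (l ++ [x])
      = if x ∈ l then PySem.List.dedup l else PySem.List.dedup l ++ [x] := by
  have h : PySem.List.dedup (l ++ [x]) = PySem.Set.add (PySem.List.dedup l) x := by
    simp [PySem.List.dedup, PySem.Set.ofList, List.foldl_append]
  rw [h]
  by_cases hx : x ∈ l
  · rw [if_pos hx]
    have hct : PySem.Set.contains (PySem.List.dedup l) x = true := by
      simp [PySem.Set.contains, PySem.List.dedup, PySem.Set.mem_ofList, hx]
    simp only [PySem.Set.add, hct, if_pos]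
  · rw [if_neg hx]
    have hct : PySem.Set.contains (PySem.List.dedup l) x = false := by
      simp [PySem.Set.contains, PySem.List.dedup, PySem.Set.mem_ofList, hx]
    simp only [PySem.Set.add, hct, Bool.false_eq_true, if_neg, reduceIte]

-- appending a pair with a different value leaves that value's class counts unchanged
lemma pvClassCounts_append_ne (qs : List (String × String)) (p : String × String) (v : String)
    (h : p.1 ≠ v) : pvB_classCounts (qs ++ [p]) v = pvB_classCounts qs v := by
  unfold pvB_classCounts
  rw [List.filter_append]
  have h1 : [p].filter (fun p => p.1 == v) = [] := by simp [List.filter_cons, h]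
  rw [h1, List.append_nil]
  apply List.map_congr_left
  intro c _
  have : (v, c) ≠ p := fun hh => h (by rw [← hh])
  simp [List.count_append, List.count_cons, this.symm]

-- when no pair has value v, the class-count list is empty
lemma pvClassCounts_of_not_mem (qs : List (String × String)) (v : String)
    (h : v ∉ qs.map Prod.fst) : pvB_classCounts qs v = [] := by
  unfold pvB_classCounts
  have : qs.filter (fun p => p.1 == v) = [] := by
    rw [List.filter_eq_nil_iff]
    intro p hp hb
    exact h (List.mem_map.mpr ⟨p, hp, by simpa using hb⟩)
  simp [this, PySem.List.dedup, PySem.Set.ofList]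

lemma pvTbl_keys (ps : List (String × String)) :
    (pvTbl ps).keys = PySem.List.dedup (ps.map Prod.fst) := by
  simp only [pvTbl, PySem.Dict.keys, PySem.Dict.items]
  exact pvMapFst _ _

lemma pvTbl_getD (ps : List (String × String)) (v : String) :
    (pvTbl ps).getD v PySem.Dict.empty = PySem.Dict.mk (pvB_classCounts ps v) := by
  by_cases hv : v ∈ ps.map Prod.fst
  · have hmem : (v, PySem.Dict.mk (pvB_classCounts ps v)) ∈ (pvTbl ps).items := by
      simp only [pvTbl, PySem.Dict.items]
      exact List.mem_map.mpr ⟨v, by simp [PySem.List.dedup, PySem.Set.mem_ofList, hv], rfl⟩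
    exact PySem.Dict.getD_of_mem_items _ hmem
      (by rw [pvTbl_keys]; exact PySem.Set.nodup_ofList _) _
  · have hc : (pvTbl ps).contains v = false := by
      rw [← Bool.not_eq_true, PySem.Dict.contains_iff_mem_keys, pvTbl_keys]
      simp [PySem.List.dedup, PySem.Set.mem_ofList, hv]
    rw [PySem.Dict.getD_of_not_contains _ _ hc, pvClassCounts_of_not_mem ps v hv]
    rfl

-- the one-pair update of a value's class-count dictionary
lemma pvRowStep (qs : List (String × String)) (p : String × String) :
    PySem.Dict.mk (pvB_classCounts (qs ++ [p]) p.1)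
      = (PySem.Dict.mk (pvB_classCounts qs p.1)).insert p.2
          ((PySem.Dict.mk (pvB_classCounts qs p.1)).getD p.2 0 + 1) := by
  have hfil : (qs ++ [p]).filter (fun q => q.1 == p.1) = qs.filter (fun q => q.1 == p.1) ++ [p] := by
    rw [List.filter_append]; simp
  have hcs : ((qs ++ [p]).filter (fun q => q.1 == p.1)).map Prod.snd
      = (qs.filter (fun q => q.1 == p.1)).map Prod.snd ++ [p.2] := by
    rw [hfil]; simp
  set cs := (qs.filter (fun q => q.1 == p.1)).map Prod.snd with hcsdef
  have hkeys : (PySem.Dict.mk (pvB_classCounts qs p.1)).keys = PySem.List.dedup cs := by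
    simp only [PySem.Dict.keys, PySem.Dict.items, pvB_classCounts]
    exact pvMapFst _ _
  have hnd : (PySem.List.dedup cs).Nodup := PySem.Set.nodup_ofList _
  have hcount : ∀ c, qs.count (p.1, c) = cs.count c := fun c => (pvCount_filter qs p.1 c).symm
  have hcountnew : ∀ c, (qs ++ [p]).count (p.1, c) = cs.count c + (if c = p.2 then 1 else 0) := by
    intro c
    rw [List.count_append, hcount]
    by_cases h : c = p.2
    · simp [h, List.count_cons]
    · have hne : p ≠ (p.1, c) := fun hh => h (by rw [hh])
      simp [List.count_cons, h, hne]
  by_cases hc : p.2 ∈ cs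
  · -- the class already occurs: insertion overwrites in place
    have hmem : (p.2, (qs.count (p.1, p.2) : Int)) ∈ (PySem.Dict.mk (pvB_classCounts qs p.1)).items := by
      simp only [PySem.Dict.items, pvB_classCounts]
      exact List.mem_map.mpr ⟨p.2, (PySem.List.mem_dedup _ _).mpr hc, rfl⟩
    have hgetD : (PySem.Dict.mk (pvB_classCounts qs p.1)).getD p.2 0 = (qs.count (p.1, p.2) : Int) :=
      PySem.Dict.getD_of_mem_items _ hmem (by rw [hkeys]; exact hnd) _
    have hcont : (PySem.Dict.mk (pvB_classCounts qs p.1)).contains p.2 = true := by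
      rw [PySem.Dict.contains_iff_mem_keys, hkeys]
      exact (PySem.List.mem_dedup _ _).mpr hc
    apply PySem.Dict.ext
    rw [hgetD, PySem.Dict.items_insert_of_contains _ _ hcont]
    simp only [PySem.Dict.items, pvB_classCounts, hcs]
    rw [pvDedup_append, if_pos hc, List.map_map]
    apply List.map_congr_left
    intro c hcmem
    by_cases h : c = p.2
    · simp [Function.comp, h, List.count_append]
    · have hn : (qs ++ [p]).count (p.1, c) = qs.count (p.1, c) := by
        rw [hcountnew, hcount]; simp [h]
      simp [Function.comp, h, hn]
  · -- a fresh class: insertion appends with count 1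
    have hcont : (PySem.Dict.mk (pvB_classCounts qs p.1)).contains p.2 = false := by
      rw [← Bool.not_eq_true, PySem.Dict.contains_iff_mem_keys, hkeys]
      simp [PySem.List.mem_dedup, hc]
    have hgetD : (PySem.Dict.mk (pvB_classCounts qs p.1)).getD p.2 0 = 0 :=
      PySem.Dict.getD_of_not_contains _ _ hcont
    apply PySem.Dict.ext
    rw [hgetD, PySem.Dict.items_insert_of_not_contains _ _ hcont]
    simp only [PySem.Dict.items, pvB_classCounts, hcs]
    rw [pvDedup_append, if_neg hc, List.map_append]
    congr 1
    · apply List.map_congr_left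
      intro c hcmem
      have hcin : c ∈ cs := (PySem.List.mem_dedup _ _).mp hcmem
      have hcne : c ≠ p.2 := fun h => hc (h ▸ hcin)
      have hn : (qs ++ [p]).count (p.1, c) = qs.count (p.1, c) := by
        rw [hcountnew, hcount]; simp [hcne]
      simp [hn]
    · have hq : qs.count p = 0 := by
        have h2 := hcount p.2
        rw [Prod.mk.eta] at h2
        rw [h2]; exact List.count_eq_zero.mpr hc
      simp [List.count_append, hq]

-- the characterisation: folding the pair-level step yields the declarative table
lemma pvTbl_char (ps : List (String × String)) :
    ps.foldl pvStep PySem.Dict.empty = pvTbl ps := by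
  induction ps using List.reverseRecOn with
  | nil => rfl
  | append_singleton qs p ih =>
    rw [List.foldl_append, List.foldl_cons, List.foldl_nil, ih]
    show (pvTbl qs).insert p.1
        (((pvTbl qs).getD p.1 PySem.Dict.empty).insert p.2
          (((pvTbl qs).getD p.1 PySem.Dict.empty).getD p.2 0 + 1)) = pvTbl (qs ++ [p])
    rw [pvTbl_getD, ← pvRowStep]
    have hmapp : (qs ++ [p]).map Prod.fst = qs.map Prod.fst ++ [p.1] := by simp
    by_cases hv : p.1 ∈ qs.map Prod.fst
    · have hcont : (pvTbl qs).contains p.1 = true := by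
        rw [PySem.Dict.contains_iff_mem_keys, pvTbl_keys]
        exact (PySem.List.mem_dedup _ _).mpr hv
      have hded : PySem.List.dedup ((qs ++ [p]).map Prod.fst)
          = PySem.List.dedup (qs.map Prod.fst) := by
        rw [hmapp, pvDedup_append, if_pos hv]
      apply PySem.Dict.ext
      rw [PySem.Dict.items_insert_of_contains _ _ hcont]
      simp only [pvTbl, PySem.Dict.items, hded, List.map_map]
      apply List.map_congr_left
      intro v hvm
      by_cases h : v = p.1
      · simp [Function.comp, h]
      · have hne : p.1 ≠ v := fun hh => h hh.symm
        simp [Function.comp, h, pvClassCounts_append_ne qs p v hne]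
    · have hcont : (pvTbl qs).contains p.1 = false := by
        rw [← Bool.not_eq_true, PySem.Dict.contains_iff_mem_keys, pvTbl_keys]
        simp [PySem.List.mem_dedup, hv]
      have hded : PySem.List.dedup ((qs ++ [p]).map Prod.fst)
          = PySem.List.dedup (qs.map Prod.fst) ++ [p.1] := by
        rw [hmapp, pvDedup_append, if_neg hv]
      apply PySem.Dict.ext
      rw [PySem.Dict.items_insert_of_not_contains _ _ hcont]
      simp only [pvTbl, PySem.Dict.items]
      rw [hded, List.map_append]
      congr 1
      apply List.map_congr_left
      intro v hvm
      have hne : p.1 ≠ v := fun hh => hv (hh ▸ (PySem.List.mem_dedup _ _).mp hvm)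
      rw [pvClassCounts_append_ne qs p v hne]

-- a class-count dict is literally Dict.mk of its list (the keys are fresh and distinct)
lemma pvOfList_nodup (L : List (String × Int)) (hnd : (L.map Prod.fst).Nodup) :
    PySem.Dict.ofList L = PySem.Dict.mk L := by
  apply PySem.Dict.ext
  show (L.foldl (fun acc p => acc.insert p.1 p.2) PySem.Dict.empty).items = L
  rw [PySem.Dict.items_foldl_insert_fresh L Prod.fst Prod.snd PySem.Dict.empty
    (fun a _ => PySem.Dict.contains_empty a.1) hnd]
  simp [PySem.Dict.empty]

-- the values of a class-count dict sum to the number of items with that value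
lemma pvValuesSum (ps : List (String × String)) (v : String) :
    (PySem.Dict.mk (pvB_classCounts ps v)).values.sum = (ps.countP (fun p => p.1 == v) : Int) := by
  set cs := (ps.filter (fun p => p.1 == v)).map Prod.snd with hcs
  have h1 : (PySem.Dict.mk (pvB_classCounts ps v)).values
      = (PySem.List.dedup cs).map (fun c => ((cs.count c : Nat) : Int)) := by
    simp only [PySem.Dict.values, PySem.Dict.items, pvB_classCounts, List.map_map]
    apply List.map_congr_left
    intro c _
    simp [Function.comp, ← pvCount_filter ps v c, hcs]
  rw [h1]
  have h2 : ((PySem.List.dedup cs).map (fun c => ((cs.count c : Nat) : Int))).sum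
      = ((((PySem.List.dedup cs).map (fun c => cs.count c)).sum : Nat) : Int) := by
    rw [Nat.cast_list_sum, List.map_map]; rfl
  rw [h2]
  have hperm : (PySem.List.dedup cs).Perm cs.dedup :=
    (List.perm_ext_iff_of_nodup (PySem.Set.nodup_ofList _) cs.nodup_dedup).mpr
      (fun a => by simp [PySem.List.dedup, PySem.Set.mem_ofList, List.mem_dedup])
  have h3 : ((PySem.List.dedup cs).map (fun c => cs.count c)).sum
      = (cs.dedup.map (fun c => cs.count c)).sum :=
    (hperm.map _).sum_eq
  rw [h3, List.sum_map_count_dedup_eq_length]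
  have h4 : cs.length = ps.countP (fun p => p.1 == v) := by
    rw [hcs, List.length_map, ← List.countP_eq_length_filter]
  rw [h4]

-- rendering A's per-key table with totals is B's declarative per-key table
lemma pvRender (ps : List (String × String)) :
    (pvTbl ps).items.map (fun q => (q.1, (q.2.insert "total_count" q.2.values.sum).items))
      = pvB_valueTable ps := by
  simp only [pvTbl, PySem.Dict.items, pvB_valueTable, List.map_map]
  apply List.map_congr_left
  intro v _
  simp only [Function.comp]
  congr 1
  have hnd : (pvB_classCounts ps v).map Prod.fst = PySem.List.dedup ((ps.filter (fun p => p.1 == v)).map Prod.snd) := by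
    simp only [pvB_classCounts]; exact pvMapFst _ _
  have hofl : PySem.Dict.ofList (pvB_classCounts ps v
        ++ [("total_count", (ps.countP (fun p => p.1 == v) : Int))])
      = (PySem.Dict.ofList (pvB_classCounts ps v)).insert "total_count"
          (ps.countP (fun p => p.1 == v) : Int) := by
    show ((pvB_classCounts ps v ++ _).foldl (fun acc p => acc.insert p.1 p.2) PySem.Dict.empty) = _
    rw [List.foldl_append]
    rfl
  rw [hofl, pvOfList_nodup _ (by rw [hnd]; exact PySem.Set.nodup_ofList _), pvValuesSum]

-- ===== VERDICT (by name: the statement is the Claim_ definition above) =====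
theorem get_value_counts_spec : Claim_equal_get_value_counts := by
  unfold Claim_equal_get_value_counts
  intro data _hdom _hpre
  show get_value_counts data = get_value_counts_alt data
  cases data with
  | nil => rfl
  | cons row0 tail =>
    cases hks : PySem.List.pyGet? ((PySem.Dict.ofList row0).keys) (-1) with
    | none => simp only [get_value_counts, get_value_counts_alt, hks]
    | some last_key =>
      simp only [get_value_counts, get_value_counts_alt, hks]
      set keys := PySem.List.slice ((PySem.Dict.ofList row0).keys) (some 1) (some (-1)) with hkdef
      have hnd : keys.Nodup :=
        List.Nodup.sublist (pvSlice_sublist _ _ _) (PySem.Dict.nodup_keys_ofList row0)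
      have hA : keys.foldl (fun value_counts key =>
            (row0 :: tail).foldl (pvA_inner last_key key) (value_counts.insert key PySem.Dict.empty))
            PySem.Dict.empty
          = PySem.Dict.mk (keys.map (fun k =>
              (k, (row0 :: tail).foldl (fun d item => pvUpd last_key k item d) PySem.Dict.empty))) := by
        have h1 : keys.foldl (fun value_counts key =>
              (row0 :: tail).foldl (pvA_inner last_key key) (value_counts.insert key PySem.Dict.empty))
              PySem.Dict.empty
            = keys.foldl (fun vc key => vc.insert key
                ((row0 :: tail).foldl (fun d item => pvUpd last_key key item d) PySem.Dict.empty))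
                PySem.Dict.empty :=
          PySem.List.foldl_congr_mem _ _ _ _ (fun acc x _ => pvA_thread last_key x (row0 :: tail) acc PySem.Dict.empty)
        rw [h1]
        exact pvBuild_canonical keys hnd _
      have hB : keys.foldl (fun res key =>
            res.insert key (pvB_valueTable (pvB_pairs (row0 :: tail) key last_key)))
            PySem.Dict.empty
          = PySem.Dict.mk (keys.map (fun k => (k, pvB_valueTable (pvB_pairs (row0 :: tail) k last_key)))) :=
        pvBuild_canonical keys hnd _
      rw [hA, hB]
      simp only [PySem.Dict.items, List.map_map]
      apply List.map_congr_left
      intro k _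
      simp only [Function.comp]
      congr 1
      have hfold : (row0 :: tail).foldl (fun d item => pvUpd last_key k item d) PySem.Dict.empty
          = (pvB_pairs (row0 :: tail) k last_key).foldl pvStep PySem.Dict.empty := by
        simp only [pvB_pairs, List.foldl_map]
        rfl
      rw [hfold, pvTbl_char, pvRender]
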